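-- pv_equiv track=rewrite | github.com/jiyojeong/secugate | scripts/map_checkov_to_iac_paths.py | _format_category_counts
-- ===== SOURCE A (Python) =====
-- from typing import Any
--
-- PATH_CATEGORY_LABELS_KO: dict[str, str] = {
--     "network_exposure_chain": "네트워크 노출형 경로",
--     "iam_privilege_chain": "IAM 권한형 경로",
--     "network_to_iam_chain": "네트워크->IAM 혼합 경로",
--     "other_chain": "기타 경로",
-- }
--
-- PATH_CATEGORY_ORDER = [
--     "network_exposure_chain",
--     "iam_privilege_chain",
--     "network_to_iam_chain",
--     "other_chain",
-- ]
--
-- def _format_category_counts(category_counts: dict[str, Any]) -> list[str]: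
--     if not isinstance(category_counts, dict) or not category_counts:
--         return ["- 없음"]
--     lines: list[str] = []
--     ordered_codes = [
--         code for code in PATH_CATEGORY_ORDER if code in category_counts
--     ] + sorted(code for code in category_counts if code not in PATH_CATEGORY_ORDER)
--     for code in ordered_codes:
--         count = category_counts.get(code, 0)
--         label = PATH_CATEGORY_LABELS_KO.get(code, code)
--         lines.append(f"- `{label}` (`{code}`): {count}")
--     return lines
-- ===== SOURCE B (Python) =====
-- PATH_CATEGORY_LABELS_KO: dict[str, str] = {
--     "network_exposure_chain": "네트워크 노출형 경로",
--     "iam_privilege_chain": "IAM 권한형 경로",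
--     "network_to_iam_chain": "네트워크->IAM 혼합 경로",
--     "other_chain": "기타 경로",
-- }
--
-- PATH_CATEGORY_ORDER = [
--     "network_exposure_chain",
--     "iam_privilege_chain",
--     "network_to_iam_chain",
--     "other_chain",
-- ]
--
-- _RANK = {code: i for i, code in enumerate(PATH_CATEGORY_ORDER)}
--
--
-- def _format_category_counts(category_counts):
--     if not isinstance(category_counts, dict) or not category_counts:
--         return ["- 없음"]
--     sentinel = len(PATH_CATEGORY_ORDER)
--     ordered = sorted(category_counts.items(),
--                      key=lambda kv: (_RANK.get(kv[0], sentinel), kv[0]))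
--     return [
--         f"- `{PATH_CATEGORY_LABELS_KO.get(code, code)}` (`{code}`): {count}"
--         for code, count in ordered
--     ]
-- ===== Notes on version B (the rewrite author's own statement) =====
-- stated objective: idiomatic
-- what changed: A orders the codes in two passes (a scan over PATH_CATEGORY_ORDER filtered by membership, concatenated with a separate sorted() of the unknown codes) and then looks each count up again with .get; B precomputes a rank index and emits the lines from one stable sort of the items keyed by (rank.get(code, sentinel), code).
import Mathlib
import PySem

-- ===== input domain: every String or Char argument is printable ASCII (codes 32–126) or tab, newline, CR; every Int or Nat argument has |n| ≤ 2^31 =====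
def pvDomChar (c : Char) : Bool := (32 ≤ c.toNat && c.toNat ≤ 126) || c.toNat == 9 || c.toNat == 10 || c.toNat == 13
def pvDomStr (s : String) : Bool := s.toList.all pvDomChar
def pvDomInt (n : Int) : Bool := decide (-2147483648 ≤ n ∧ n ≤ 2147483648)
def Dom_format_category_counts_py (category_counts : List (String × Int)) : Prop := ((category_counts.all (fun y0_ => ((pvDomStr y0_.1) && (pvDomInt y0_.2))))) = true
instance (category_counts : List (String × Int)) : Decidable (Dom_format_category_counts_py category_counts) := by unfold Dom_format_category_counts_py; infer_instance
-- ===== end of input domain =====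

-- B replaces A's two-pass ordering (a priority scan over PATH_CATEGORY_ORDER plus a separate
-- sorted() of the leftover codes) by ONE stable sort of the items keyed by (rank, code); objective: idiomatic.
-- The dict argument arrives as a pair list; both ports first materialise it with Python's dict
-- construction semantics (a later value overwrites, the first position is kept), which is exact
-- also when the pair list carries duplicate keys.

def pvOrder : List String :=
  ["network_exposure_chain", "iam_privilege_chain", "network_to_iam_chain", "other_chain"]

def pvLabels : PySem.Dict String String :=
  PySem.Dict.ofList
    [("network_exposure_chain", "네트워크 노출형 경로"),
     ("iam_privilege_chain", "IAM 권한형 경로"),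
     ("network_to_iam_chain", "네트워크->IAM 혼합 경로"),
     ("other_chain", "기타 경로")]

-- the f-string f"- `{label}` (`{code}`): {count}" with label = LABELS.get(code, code), identical in both sources
def pvLine (code : String) (count : Int) : String :=
  PySem.Str.join "" ["- `", pvLabels.getD code code, "` (`", code, "`): ", PySem.Int.toStr count]

-- ===== PORT A =====
def format_category_counts_py (category_counts : List (String × Int)) : List String :=
  let d := category_counts.foldl (fun d p => d.insert p.1 p.2) PySem.Dict.empty
  if d.items = [] then ["- 없음"]
  else
    let ordered_codes :=
      pvOrder.filter (fun code => d.contains code)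
        ++ PySem.List.sorted (d.keys.filter (fun code => !pvOrder.contains code)) (fun x => x) false
    ordered_codes.foldl (fun lines code => lines ++ [pvLine code (d.getD code 0)]) []

-- ===== PORT B =====
-- _RANK = {code: i for i, code in enumerate(PATH_CATEGORY_ORDER)}
def pvRank : PySem.Dict String Int :=
  (PySem.List.enumerate pvOrder 0).foldl (fun d p => d.insert p.2 p.1) PySem.Dict.empty

def format_category_counts_py_alt (category_counts : List (String × Int)) : List String :=
  let d := category_counts.foldl (fun d p => d.insert p.1 p.2) PySem.Dict.empty
  if d.items = [] then ["- 없음"]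
  else
    let sentinel : Int := pvOrder.length
    (PySem.List.sorted d.items (fun kv => toLex (pvRank.getD kv.1 sentinel, kv.1)) false).map
      (fun kv => pvLine kv.1 kv.2)

-- ===== PRECONDITION & SPEC =====
def Spec_format_category_counts_py (category_counts : List (String × Int)) (out : List String) : Prop := out = format_category_counts_py_alt category_counts
instance (category_counts : List (String × Int)) (out : List String) : Decidable (Spec_format_category_counts_py category_counts out) := by unfold Spec_format_category_counts_py; infer_instance

-- ===== CLAIM (what is proved, stated in full; the proofs are below) =====
def Claim_equal_format_category_counts_py : Prop := ∀ (category_counts : List (String × Int)), Dom_format_category_counts_py category_counts → Spec_format_category_counts_py category_counts (format_category_counts_py category_counts)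

-- ===== LEMMAS AND PROOFS =====

theorem pvRank_keys : pvRank.keys = pvOrder := by decide

theorem pvRank_getD_of_not_mem {c : String} (h : c ∉ pvOrder) :
    pvRank.getD c (pvOrder.length : Int) = (pvOrder.length : Int) := by
  apply PySem.Dict.getD_of_not_contains
  cases h' : pvRank.contains c with
  | false => rfl
  | true => exact absurd (pvRank_keys ▸ (PySem.Dict.contains_iff_mem_keys _ _).1 h') h

theorem pvRank_getD_lt_of_mem {c : String} (h : c ∈ pvOrder) :
    pvRank.getD c (pvOrder.length : Int) < (pvOrder.length : Int) := by
  fin_cases h <;> decide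

-- the heart: B's single stable sort of the items yields exactly A's ordered code list (paired with the counts)
theorem sorted_items_eq (d : PySem.Dict String Int) (hnd : d.keys.Nodup) :
    PySem.List.sorted d.items (fun kv => toLex (pvRank.getD kv.1 (pvOrder.length : Int), kv.1)) false
      = (pvOrder.filter (fun code => d.contains code)
          ++ PySem.List.sorted (d.keys.filter (fun code => !pvOrder.contains code)) (fun x => x) false).map
        (fun c => (c, d.getD c 0)) := by
  set rest := PySem.List.sorted (d.keys.filter (fun code => !pvOrder.contains code)) (fun x => x) false with hrest
  set front := pvOrder.filter (fun code => d.contains code) with hfront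
  have hrestperm : rest.Perm (d.keys.filter (fun code => !pvOrder.contains code)) :=
    PySem.List.sorted_perm _ _ _
  have hrestmem : ∀ a ∈ rest, a ∉ pvOrder := by
    intro a ha
    have := hrestperm.mem_iff.1 ha
    simp only [List.mem_filter, Bool.not_eq_eq_eq_not, Bool.not_true] at this
    simpa using this.2
  apply PySem.List.sorted_eq_of_perm_of_pairwise_lt
  · -- the right-hand side is a permutation of the items
    rw [PySem.Dict.items_eq_map_keys d hnd 0]
    refine List.Perm.map _ ?_
    have h1 : front.Perm (d.keys.filter (fun code => pvOrder.contains code)) := by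
      apply List.perm_of_nodup_nodup_toFinset_eq
      · exact List.Nodup.filter _ (by decide)
      · exact List.Nodup.filter _ hnd
      · ext x
        simp only [List.mem_toFinset, List.mem_filter, hfront]
        constructor
        · rintro ⟨hx, hc⟩
          exact ⟨(PySem.Dict.contains_iff_mem_keys _ _).1 hc, by simpa using hx⟩
        · rintro ⟨hx, hc⟩
          exact ⟨by simpa using hc, (PySem.Dict.contains_iff_mem_keys _ _).2 hx⟩
    exact (List.Perm.append h1 hrestperm).trans (List.filter_append_perm _ _)
  · -- and it is strictly increasing in B's key
    rw [List.pairwise_map]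
    show List.Pairwise
      (fun a b => toLex (pvRank.getD a (pvOrder.length : Int), a)
                    < toLex (pvRank.getD b (pvOrder.length : Int), b)) (front ++ rest)
    refine (List.pairwise_append).2 ⟨?_, ?_, ?_⟩
    · -- within the priority part: ranks are the (strictly increasing) indices in pvOrder
      exact List.Pairwise.sublist (l₂ := pvOrder) List.filter_sublist (by decide)
    · -- within the leftover part: equal sentinel ranks, codes strictly increasing (sorted + nodup)
      have hle : rest.Pairwise (fun a b => a ≤ b) := PySem.List.sorted_pairwise _ _
      have hnr : rest.Pairwise (fun a b => a ≠ b) := hrestperm.nodup_iff.2 (List.Nodup.filter _ hnd)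
      refine List.Pairwise.imp_of_mem ?_ (hle.and hnr)
      intro a b ha hb hab
      have hra := pvRank_getD_of_not_mem (hrestmem a ha)
      have hrb := pvRank_getD_of_not_mem (hrestmem b hb)
      exact Prod.Lex.toLex_lt_toLex.2 (Or.inr ⟨by rw [hra, hrb], lt_of_le_of_ne hab.1 hab.2⟩)
    · -- across: every priority rank is below the sentinel rank
      intro a ha b hb
      have hao : a ∈ pvOrder := (List.mem_filter.1 (hfront ▸ ha)).1
      have hra := pvRank_getD_lt_of_mem hao
      have hrb := pvRank_getD_of_not_mem (hrestmem b hb)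
      exact Prod.Lex.toLex_lt_toLex.2 (Or.inl (by rw [hrb]; exact hra))

-- ===== VERDICT (by name: the statement is the Claim_ definition above) =====
theorem format_category_counts_py_spec : Claim_equal_format_category_counts_py := by
  intro cc _hdom
  unfold Spec_format_category_counts_py format_category_counts_py format_category_counts_py_alt
  set d := cc.foldl (fun d p => d.insert p.1 p.2) PySem.Dict.empty with hd
  have hnd : d.keys.Nodup :=
    PySem.Dict.nodup_keys_foldl_insert_key cc Prod.fst (fun d p => p.2) PySem.Dict.empty
      PySem.Dict.nodup_keys_empty
  by_cases he : d.items = []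
  · simp [he]
  · simp only [he, if_false]
    rw [sorted_items_eq d hnd, List.map_map]
    rw [PySem.List.foldl_append_singleton_eq_map]
    rfl
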